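-- pv_equiv track=rewrite | github.com/MelnychenkoM/xyz2atoms | xyz2atoms/molecule.py | _traverse_cycle
-- ===== SOURCE A (Python) =====
-- def _traverse_cycle(graph, start_node, direction='forward', start_index=0, idx=1, cycle=100):
--
--     visited = set()
--     stack = [start_node]
--     index = start_index
--     atom_names = {}
--
--     while stack:
--         current_node = stack.pop()
--         if current_node not in visited:
--             visited.add(current_node)
--
--             if index == cycle - 1:
--                 index += 1
--
--             index = (index + idx) % cycle
--
--             neighbors = [neighbor for neighbor in graph[current_node] if neighbor in graph]
--
--             if current_node.startswith('N'):
--                 atom_names[current_node] = f"N{index}"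
--             elif current_node.startswith('C'):
--                 atom_names[current_node] = f"C{index}"
--
--             if direction == 'forward':
--                 neighbors = neighbors[::-1]
--             for neighbor in neighbors:
--                 if neighbor not in visited:
--                     stack.append(neighbor)
--     return atom_names
-- ===== SOURCE B (Python) =====
-- def _traverse_cycle(graph, start_node, direction='forward', start_index=0, idx=1, cycle=100):
--     # Recursive DFS instead of an explicit stack; same first-visit order, same names.
--     # (Can hit Python's recursion limit on extremely deep graphs where A would not.)
--     visited = set()
--     atom_names = {}
--     index = start_index
--
--     def visit(node):
--         nonlocal index
--         if node in visited:
--             return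
--         visited.add(node)
--         if index == cycle - 1:
--             index += 1
--         index = (index + idx) % cycle
--         if node.startswith('N'):
--             atom_names[node] = f"N{index}"
--         elif node.startswith('C'):
--             atom_names[node] = f"C{index}"
--         neighbors = [n for n in graph[node] if n in graph]
--         if direction != 'forward':
--             neighbors = neighbors[::-1]
--         for n in neighbors:
--             visit(n)
--
--     visit(start_node)
--     return atom_names
-- ===== Notes on version B (the rewrite author's own statement) =====
-- stated objective: alternative
-- what changed: Replaces the explicit-stack worklist loop (pop, visited-check, push reversed/unreversed unvisited neighbors) by a recursive DFS helper visit(node) that threads the running index through a nonlocal and recurses into in-graph neighbors in direction-dependent order.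
import Mathlib
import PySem

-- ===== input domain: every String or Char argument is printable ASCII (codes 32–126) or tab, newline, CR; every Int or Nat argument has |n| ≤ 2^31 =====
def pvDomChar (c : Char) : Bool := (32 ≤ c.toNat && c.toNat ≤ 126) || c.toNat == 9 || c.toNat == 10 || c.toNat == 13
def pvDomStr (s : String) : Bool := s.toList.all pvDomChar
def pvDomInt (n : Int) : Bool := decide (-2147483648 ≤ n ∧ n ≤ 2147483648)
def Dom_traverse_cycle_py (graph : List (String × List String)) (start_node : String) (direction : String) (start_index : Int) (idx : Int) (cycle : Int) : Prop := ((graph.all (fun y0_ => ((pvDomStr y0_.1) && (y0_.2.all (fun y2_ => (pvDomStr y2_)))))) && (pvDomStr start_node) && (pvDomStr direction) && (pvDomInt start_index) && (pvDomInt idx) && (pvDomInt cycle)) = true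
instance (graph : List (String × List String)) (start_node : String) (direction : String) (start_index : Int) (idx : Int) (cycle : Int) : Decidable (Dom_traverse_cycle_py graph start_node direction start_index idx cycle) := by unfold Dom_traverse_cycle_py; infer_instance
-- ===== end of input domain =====

-- B replaces A's explicit-stack DFS loop by a recursive DFS (visit a node, then recurse
-- into its in-graph neighbors in direction-dependent order); same return value, no speed claim.


-- ===== PORT A =====
-- transliteration of A's while-loop; the stack is a Lean list with its HEAD as the stack top;
-- the extra Nat argument is fuel that only makes the loop total (pvLoopA_adeq below proves the
-- fuel passed by the wrapper is never exhausted); graph[current_node] is getD with default []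
-- (Pre_ guarantees every popped node is a key, so the default is never the Python behaviour).
def trLoopAF (g : PySem.Dict String (List String)) (direction : String) (idxp cycle : Int) :
    Nat → List String → PySem.Set String → Int → PySem.Dict String String → PySem.Dict String String
  | 0, _, _, _, atom_names => atom_names          -- unreachable with the wrapper's fuel
  | _ + 1, [], _, _, atom_names => atom_names
  | f + 1, current :: rest, visited, index, atom_names =>
    if PySem.Set.contains visited current then
      trLoopAF g direction idxp cycle f rest visited index atom_names
    else
      let visited' := PySem.Set.add visited current
      let index1 := if index = cycle - 1 then index + 1 else index
      let index' := PySem.Int.mod (index1 + idxp) cycle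
      let neighbors := (g.getD current []).filter (fun n => g.contains n)
      let atom_names' :=
        if PySem.Str.startswith current "N" then atom_names.insert current ("N" ++ PySem.Int.toStr index')
        else if PySem.Str.startswith current "C" then atom_names.insert current ("C" ++ PySem.Int.toStr index')
        else atom_names
      let pushOrder := if direction = "forward" then neighbors.reverse else neighbors
      let pushed := (pushOrder.filter (fun n => !(PySem.Set.contains visited' n))).reverse
      trLoopAF g direction idxp cycle f (pushed ++ rest) visited' index' atom_names'

def traverse_cycle_py (graph : List (String × List String)) (start_node : String) (direction : String) (start_index : Int) (idx : Int) (cycle : Int) : List (String × String) :=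
  -- fuel bounds the number of loop iterations: 1 pop for start_node plus at most
  -- graph.length * (total neighbor count) pushes
  (trLoopAF (PySem.Dict.mk graph) direction idx cycle
    (graph.length * ((graph.map (fun p => p.2.length)).sum) + 1)
    [start_node] PySem.Set.empty start_index PySem.Dict.empty).items

-- ===== PORT B =====
-- transliteration of Source B's recursive DFS; the nonlocal/mutated state (visited, index,
-- atom_names) is threaded as PvSt; the Nat argument is fuel bounding the recursion DEPTH,
-- which only makes the recursion total (pvVisitF_adeq below proves the wrapper's fuel suffices)
structure PvSt where
  visited : PySem.Set String
  index : Int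
  names : PySem.Dict String String

def pvVisitF (g : PySem.Dict String (List String)) (direction : String) (idxp cycle : Int) :
    Nat → String → PvSt → PvSt
  | 0, _, s => s                                   -- unreachable with the wrapper's fuel
  | f + 1, node, s =>
    if PySem.Set.contains s.visited node then s
    else
      let visited' := PySem.Set.add s.visited node
      let index1 := if s.index = cycle - 1 then s.index + 1 else s.index
      let index' := PySem.Int.mod (index1 + idxp) cycle
      let names' :=
        if PySem.Str.startswith node "N" then s.names.insert node ("N" ++ PySem.Int.toStr index')
        else if PySem.Str.startswith node "C" then s.names.insert node ("C" ++ PySem.Int.toStr index')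
        else s.names
      let neighbors0 := (g.getD node []).filter (fun n => g.contains n)
      let neighbors := if direction ≠ "forward" then neighbors0.reverse else neighbors0
      neighbors.foldl (fun t n => pvVisitF g direction idxp cycle f n t) ⟨visited', index', names'⟩

def traverse_cycle_py_alt (graph : List (String × List String)) (start_node : String) (direction : String) (start_index : Int) (idx : Int) (cycle : Int) : List (String × String) :=
  -- fuel bounds the recursion depth: each level visits a new graph key (plus one for start_node)
  (pvVisitF (PySem.Dict.mk graph) direction idx cycle (graph.length + 1) start_node
    ⟨PySem.Set.empty, start_index, PySem.Dict.empty⟩).names.items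

-- ===== PRECONDITION & SPEC =====
-- Pre_ excludes exactly the inputs on which A raises: a start_node that is not a key of
-- graph (KeyError on graph[start_node]) and cycle = 0 (ZeroDivisionError on % cycle).
def Pre_traverse_cycle_py (graph : List (String × List String)) (start_node : String) (direction : String) (start_index : Int) (idx : Int) (cycle : Int) : Prop :=
  (PySem.Dict.mk graph).contains start_node = true ∧ cycle ≠ 0
instance (graph : List (String × List String)) (start_node : String) (direction : String) (start_index : Int) (idx : Int) (cycle : Int) : Decidable (Pre_traverse_cycle_py graph start_node direction start_index idx cycle) := by unfold Pre_traverse_cycle_py; infer_instance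

def pvWitness_traverse_cycle_py : (List (String × List String)) × String × String × Int × Int × Int :=
  ([("N1", ["C2"]), ("C2", ["N1"])], "N1", "forward", 0, 1, 100)

def Spec_traverse_cycle_py (graph : List (String × List String)) (start_node : String) (direction : String) (start_index : Int) (idx : Int) (cycle : Int) (out : List (String × String)) : Prop := out = traverse_cycle_py_alt graph start_node direction start_index idx cycle
instance (graph : List (String × List String)) (start_node : String) (direction : String) (start_index : Int) (idx : Int) (cycle : Int) (out : List (String × String)) : Decidable (Spec_traverse_cycle_py graph start_node direction start_index idx cycle out) := by unfold Spec_traverse_cycle_py; infer_instance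

-- ===== CLAIM (what is proved, stated in full; the proofs are below) =====
def Claim_equal_traverse_cycle_py : Prop := ∀ (graph : List (String × List String)) (start_node : String) (direction : String) (start_index : Int) (idx : Int) (cycle : Int), Dom_traverse_cycle_py graph start_node direction start_index idx cycle → Pre_traverse_cycle_py graph start_node direction start_index idx cycle → Spec_traverse_cycle_py graph start_node direction start_index idx cycle (traverse_cycle_py graph start_node direction start_index idx cycle)

-- ===== LEMMAS AND PROOFS =====

theorem pvWitness_ok :
    Dom_traverse_cycle_py (pvWitness_traverse_cycle_py.1) (pvWitness_traverse_cycle_py.2.1) (pvWitness_traverse_cycle_py.2.2.1) (pvWitness_traverse_cycle_py.2.2.2.1) (pvWitness_traverse_cycle_py.2.2.2.2.1) (pvWitness_traverse_cycle_py.2.2.2.2.2) ∧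
    Pre_traverse_cycle_py (pvWitness_traverse_cycle_py.1) (pvWitness_traverse_cycle_py.2.1) (pvWitness_traverse_cycle_py.2.2.1) (pvWitness_traverse_cycle_py.2.2.2.1) (pvWitness_traverse_cycle_py.2.2.2.2.1) (pvWitness_traverse_cycle_py.2.2.2.2.2) := by
  constructor <;> decide

-- ---- measure helpers ----

-- number of graph keys not yet visited
def pvUc (g : PySem.Dict String (List String)) (visited : PySem.Set String) : Nat :=
  (g.keys.filter (fun k => !(PySem.Set.contains visited k))).length

-- total degree of the unvisited keys (fuel potential for A's loop)
def pvSumDeg (g : PySem.Dict String (List String)) (visited : PySem.Set String) : Nat :=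
  ((g.keys.filter (fun k => !(PySem.Set.contains visited k))).map (fun k => (g.getD k []).length)).sum

theorem pvFilter_le {α : Type} (l : List α) (p q : α → Bool)
    (himp : ∀ a, q a = true → p a = true) : (l.filter q).length ≤ (l.filter p).length := by
  induction l with
  | nil => exact Nat.le_refl _
  | cons x xs ih =>
    simp only [List.filter_cons]
    by_cases hq : q x = true
    · rw [if_pos hq, if_pos (himp x hq)]
      simpa using ih
    · rw [if_neg hq]
      by_cases hp : p x = true
      · rw [if_pos hp]
        exact Nat.le_succ_of_le ih
      · rw [if_neg hp]
        exact ih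

theorem pvFilter_lt {α : Type} (l : List α) (p q : α → Bool)
    (himp : ∀ a, q a = true → p a = true) (x : α) (hx : x ∈ l)
    (hpx : p x = true) (hqx : q x = false) :
    (l.filter q).length < (l.filter p).length := by
  induction l with
  | nil => cases hx
  | cons y ys ih =>
    simp only [List.filter_cons]
    rcases List.mem_cons.mp hx with h | h
    · subst h
      rw [if_neg (by simp [hqx]), if_pos hpx]
      exact Nat.lt_succ_of_le (pvFilter_le ys p q himp)
    · by_cases hq : q y = true
      · rw [if_pos hq, if_pos (himp y hq)]
        simpa using ih h
      · rw [if_neg hq]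
        by_cases hp : p y = true
        · rw [if_pos hp]
          exact Nat.lt_succ_of_lt (ih h)
        · rw [if_neg hp]
          exact ih h

theorem pvSumFilter_le {α : Type} (l : List α) (f : α → Nat) (p q : α → Bool)
    (himp : ∀ a, q a = true → p a = true) :
    ((l.filter q).map f).sum ≤ ((l.filter p).map f).sum := by
  induction l with
  | nil => exact Nat.le_refl _
  | cons x xs ih =>
    simp only [List.filter_cons]
    by_cases hq : q x = true
    · rw [if_pos hq, if_pos (himp x hq)]
      simp only [List.map_cons, List.sum_cons]
      omega
    · rw [if_neg hq]
      by_cases hp : p x = true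
      · rw [if_pos hp]
        simp only [List.map_cons, List.sum_cons]
        omega
      · rw [if_neg hp]
        exact ih

theorem pvSumFilter_lt {α : Type} (l : List α) (f : α → Nat) (p q : α → Bool)
    (himp : ∀ a, q a = true → p a = true) (x : α) (hx : x ∈ l)
    (hpx : p x = true) (hqx : q x = false) :
    ((l.filter q).map f).sum + f x ≤ ((l.filter p).map f).sum := by
  induction l with
  | nil => cases hx
  | cons y ys ih =>
    simp only [List.filter_cons]
    rcases List.mem_cons.mp hx with h | h
    · subst h
      rw [if_neg (by simp [hqx]), if_pos hpx]
      simp only [List.map_cons, List.sum_cons]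
      have := pvSumFilter_le ys f p q himp
      omega
    · by_cases hq : q y = true
      · rw [if_pos hq, if_pos (himp y hq)]
        simp only [List.map_cons, List.sum_cons]
        have := ih h
        omega
      · rw [if_neg hq]
        by_cases hp : p y = true
        · rw [if_pos hp]
          simp only [List.map_cons, List.sum_cons]
          have := ih h
          omega
        · rw [if_neg hp]
          exact ih h

theorem pvMem_of_contains_add (v : PySem.Set String) (c x : String)
    (h : PySem.Set.contains v x = true) : PySem.Set.contains (PySem.Set.add v c) x = true := by
  rw [PySem.Set.contains_iff] at h ⊢
  exact (PySem.Set.mem_add _ _ _).mpr (Or.inl h)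

theorem pvAddImp (v : PySem.Set String) (c : String) :
    ∀ a, (!(PySem.Set.contains (PySem.Set.add v c) a)) = true → (!(PySem.Set.contains v a)) = true := by
  intro a ha
  simp [PySem.Set.mem_add] at ha ⊢
  exact ha.1

theorem pvUc_le (g : PySem.Dict String (List String)) (v w : PySem.Set String)
    (h : ∀ x, PySem.Set.contains v x = true → PySem.Set.contains w x = true) :
    pvUc g w ≤ pvUc g v := by
  apply pvFilter_le
  intro a ha
  cases hva : PySem.Set.contains v a with
  | false => rfl
  | true => rw [h a hva] at ha; cases ha

theorem pvUc_add_lt (g : PySem.Dict String (List String)) (v : PySem.Set String) (c : String)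
    (hk : c ∈ g.keys) (hv : PySem.Set.contains v c = false) :
    pvUc g (PySem.Set.add v c) < pvUc g v := by
  refine pvFilter_lt _ _ _ (pvAddImp v c) c hk ?_ ?_
  · simp only [Bool.not_eq_true', hv]
  · simp [PySem.Set.mem_add]

theorem pvContains_add_of_ne (v : PySem.Set String) (c a : String) (hne : a ≠ c) :
    PySem.Set.contains (PySem.Set.add v c) a = PySem.Set.contains v a := by
  cases hva : PySem.Set.contains v a with
  | true => exact pvMem_of_contains_add v c a hva
  | false =>
    cases hca : PySem.Set.contains (PySem.Set.add v c) a with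
    | false => rfl
    | true =>
      exfalso
      rcases (PySem.Set.mem_add v c a).mp ((PySem.Set.contains_iff _ _).mp hca) with h | h
      · rw [(PySem.Set.contains_iff _ _).mpr h] at hva; cases hva
      · exact hne h

theorem pvUc_add_eq (g : PySem.Dict String (List String)) (v : PySem.Set String) (c : String)
    (hk : c ∉ g.keys) : pvUc g (PySem.Set.add v c) = pvUc g v := by
  unfold pvUc
  apply congrArg
  apply List.filter_congr
  intro a ha
  have hne : a ≠ c := fun h => hk (h ▸ ha)
  rw [pvContains_add_of_ne v c a hne]

theorem pvSumDeg_add_le (g : PySem.Dict String (List String)) (v : PySem.Set String) (c : String)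
    (hk : c ∈ g.keys) (hv : PySem.Set.contains v c = false) :
    pvSumDeg g (PySem.Set.add v c) + (g.getD c []).length ≤ pvSumDeg g v := by
  exact pvSumFilter_lt g.keys (fun k => (g.getD k []).length) _ _ (pvAddImp v c) c hk
    (by simp only [Bool.not_eq_true', hv]) (by simp [PySem.Set.mem_add])

theorem pvSumDeg_add_eq (g : PySem.Dict String (List String)) (v : PySem.Set String) (c : String)
    (hk : c ∉ g.keys) : pvSumDeg g (PySem.Set.add v c) = pvSumDeg g v := by
  unfold pvSumDeg
  have : g.keys.filter (fun k => !(PySem.Set.contains (PySem.Set.add v c) k)) =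
      g.keys.filter (fun k => !(PySem.Set.contains v k)) := by
    apply List.filter_congr
    intro a ha
    have hne : a ≠ c := fun h => hk (h ▸ ha)
    rw [pvContains_add_of_ne v c a hne]
  rw [this]

-- nodes that are not keys have an empty filtered neighbor list
theorem pvNonkey_neighbors (g : PySem.Dict String (List String)) (c : String) (hk : c ∉ g.keys) :
    (g.getD c []).filter (fun n => g.contains n) = [] := by
  have : g.contains c = false := by
    rw [PySem.Dict.contains_eq_decide_mem_keys]; simp [hk]
  rw [PySem.Dict.getD_of_not_contains _ _ this]; rfl

-- ---- well-founded reference versions of both programs (proof-level only) ----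

def trLoopA (g : PySem.Dict String (List String)) (direction : String) (idxp cycle : Int)
    (stack : List String) (visited : PySem.Set String) (index : Int)
    (atom_names : PySem.Dict String String) : PySem.Dict String String :=
  match stack with
  | [] => atom_names
  | current :: rest =>
    if hv : PySem.Set.contains visited current = true then
      trLoopA g direction idxp cycle rest visited index atom_names
    else
      let visited' := PySem.Set.add visited current
      let index1 := if index = cycle - 1 then index + 1 else index
      let index' := PySem.Int.mod (index1 + idxp) cycle
      let neighbors := (g.getD current []).filter (fun n => g.contains n)
      let atom_names' :=
        if PySem.Str.startswith current "N" then atom_names.insert current ("N" ++ PySem.Int.toStr index')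
        else if PySem.Str.startswith current "C" then atom_names.insert current ("C" ++ PySem.Int.toStr index')
        else atom_names
      let pushOrder := if direction = "forward" then neighbors.reverse else neighbors
      let pushed := (pushOrder.filter (fun n => !(PySem.Set.contains visited' n))).reverse
      trLoopA g direction idxp cycle (pushed ++ rest) visited' index' atom_names'
termination_by (pvUc g visited, stack.length)
decreasing_by
  · exact Prod.Lex.right _ (Nat.lt_succ_self _)
  · by_cases hk : current ∈ g.keys
    · exact Prod.Lex.left _ _ (pvUc_add_lt g visited current hk (by simpa using hv))
    · rw [pvUc_add_eq g visited current hk]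
      apply Prod.Lex.right
      rw [pvNonkey_neighbors g current hk]
      simp

mutual
def pvVisit (g : PySem.Dict String (List String)) (direction : String) (idxp cycle : Int)
    (node : String) (s : PvSt) :
    {t : PvSt // ∀ x, PySem.Set.contains s.visited x = true → PySem.Set.contains t.visited x = true} :=
  if hv : PySem.Set.contains s.visited node = true then ⟨s, fun _ h => h⟩
  else
    let visited' := PySem.Set.add s.visited node
    let index1 := if s.index = cycle - 1 then s.index + 1 else s.index
    let index' := PySem.Int.mod (index1 + idxp) cycle
    let names' :=
      if PySem.Str.startswith node "N" then s.names.insert node ("N" ++ PySem.Int.toStr index')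
      else if PySem.Str.startswith node "C" then s.names.insert node ("C" ++ PySem.Int.toStr index')
      else s.names
    let neighbors0 := (g.getD node []).filter (fun n => g.contains n)
    let neighbors := if direction ≠ "forward" then neighbors0.reverse else neighbors0
    let r := pvVisitList g direction idxp cycle neighbors ⟨visited', index', names'⟩
    ⟨r.1, fun x h => r.2 x (pvMem_of_contains_add _ _ _ h)⟩
termination_by (pvUc g s.visited, 2)
decreasing_by
  by_cases hk : node ∈ g.keys
  · exact Prod.Lex.left _ _ (pvUc_add_lt g s.visited node hk (by simpa using hv))
  · rw [pvUc_add_eq g s.visited node hk]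
    apply Prod.Lex.right
    rw [pvNonkey_neighbors g node hk]
    simp

def pvVisitList (g : PySem.Dict String (List String)) (direction : String) (idxp cycle : Int)
    (ns : List String) (s : PvSt) :
    {t : PvSt // ∀ x, PySem.Set.contains s.visited x = true → PySem.Set.contains t.visited x = true} :=
  match ns with
  | [] => ⟨s, fun _ h => h⟩
  | n :: rest =>
      let r1 := pvVisit g direction idxp cycle n s
      let r2 := pvVisitList g direction idxp cycle rest r1.1
      ⟨r2.1, fun x h => r2.2 x (r1.2 x h)⟩
termination_by (pvUc g s.visited, 2 * ns.length + 1)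
decreasing_by
  · exact Prod.Lex.right _ (by simp only [List.length_cons]; omega)
  · have hle : pvUc g (↑r1 : PvSt).visited ≤ pvUc g s.visited := pvUc_le g s.visited _ r1.2
    show Prod.Lex (fun a b => a < b) (fun a b => a < b)
      (pvUc g (↑r1 : PvSt).visited, 2 * rest.length + 1)
      (pvUc g s.visited, 2 * (n :: rest).length + 1)
    rcases Nat.lt_or_eq_of_le hle with h | h
    · exact Prod.Lex.left _ _ h
    · rw [h]
      exact Prod.Lex.right _ (by simp only [List.length_cons]; omega)
end

-- visiting an already-visited node is the identity
theorem pvVisit_visited (g : PySem.Dict String (List String)) (direction : String) (idxp cycle : Int)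
    (n : String) (s : PvSt) (h : PySem.Set.contains s.visited n = true) :
    (pvVisit g direction idxp cycle n s).1 = s := by
  rw [PySem.Set.contains_iff] at h
  rw [pvVisit]
  simp [h]

-- one-step equations for the list recursion
theorem pvVisitList_nil (g : PySem.Dict String (List String)) (direction : String) (idxp cycle : Int)
    (s : PvSt) : (pvVisitList g direction idxp cycle [] s).1 = s := by
  rw [pvVisitList]

theorem pvVisitList_cons (g : PySem.Dict String (List String)) (direction : String) (idxp cycle : Int)
    (n : String) (rest : List String) (s : PvSt) :
    (pvVisitList g direction idxp cycle (n :: rest) s).1 =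
    (pvVisitList g direction idxp cycle rest (pvVisit g direction idxp cycle n s).1).1 := by
  rw [pvVisitList]

-- filtering already-visited nodes out of a visit list does not change the result
theorem pvVisitList_filter (g : PySem.Dict String (List String)) (direction : String) (idxp cycle : Int)
    (ns : List String) (v : PySem.Set String) (s : PvSt)
    (h : ∀ x, PySem.Set.contains v x = true → PySem.Set.contains s.visited x = true) :
    (pvVisitList g direction idxp cycle (ns.filter (fun n => !(PySem.Set.contains v n))) s).1 =
    (pvVisitList g direction idxp cycle ns s).1 := by
  induction ns generalizing s with
  | nil => simp
  | cons n rest ih =>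
    by_cases hn : PySem.Set.contains v n = true
    · have hf : (n :: rest).filter (fun n => !(PySem.Set.contains v n)) =
        rest.filter (fun n => !(PySem.Set.contains v n)) := by
        simp only [List.filter_cons, hn, Bool.not_true, Bool.false_eq_true, if_false]
      rw [hf, ih s h, pvVisitList_cons, pvVisit_visited _ _ _ _ _ _ (h n hn)]
    · simp only [Bool.not_eq_true] at hn
      have hf : (n :: rest).filter (fun n => !(PySem.Set.contains v n)) =
        n :: rest.filter (fun n => !(PySem.Set.contains v n)) := by
        simp only [List.filter_cons, hn, Bool.not_false, if_true]
      rw [hf, pvVisitList_cons, pvVisitList_cons]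
      exact ih _ (fun x hx => (pvVisit g direction idxp cycle n s).2 x (h x hx))

-- visiting an appended list is visiting the two halves in sequence
theorem pvVisitList_append (g : PySem.Dict String (List String)) (direction : String) (idxp cycle : Int)
    (xs ys : List String) (s : PvSt) :
    (pvVisitList g direction idxp cycle (xs ++ ys) s).1 =
    (pvVisitList g direction idxp cycle ys (pvVisitList g direction idxp cycle xs s).1).1 := by
  induction xs generalizing s with
  | nil => rw [List.nil_append, pvVisitList_nil]
  | cons x xs ih =>
    rw [List.cons_append, pvVisitList_cons, pvVisitList_cons]
    exact ih _

-- main bisimulation: A's stack loop computes B's recursive DFS result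
theorem pvMain (g : PySem.Dict String (List String)) (direction : String) (idxp cycle : Int)
    (stack : List String) (s : PvSt) :
    trLoopA g direction idxp cycle stack s.visited s.index s.names =
    ((pvVisitList g direction idxp cycle stack s).1).names := by
  match stack with
  | [] => rw [trLoopA, pvVisitList]
  | current :: rest =>
    by_cases hv : PySem.Set.contains s.visited current = true
    · rw [trLoopA]
      simp only [hv, dif_pos]
      rw [pvVisitList_cons, pvVisit_visited _ _ _ _ _ _ hv]
      exact pvMain g direction idxp cycle rest s
    · rw [trLoopA]
      simp only [hv, dif_neg, Bool.false_eq_true, not_false_iff]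
      set visited' := PySem.Set.add s.visited current with hvd
      set index1 := if s.index = cycle - 1 then s.index + 1 else s.index with hi1
      set index' := PySem.Int.mod (index1 + idxp) cycle with hid
      set neighbors := (g.getD current []).filter (fun n => g.contains n) with hnb
      set names' :=
        (if PySem.Str.startswith current "N" then s.names.insert current ("N" ++ PySem.Int.toStr index')
         else if PySem.Str.startswith current "C" then s.names.insert current ("C" ++ PySem.Int.toStr index')
         else s.names) with hnm
      have hstep :
          trLoopA g direction idxp cycle
            (((if direction = "forward" then neighbors.reverse else neighbors).filter
                (fun n => !(PySem.Set.contains visited' n))).reverse ++ rest)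
            visited' index' names' =
          ((pvVisitList g direction idxp cycle
            (((if direction = "forward" then neighbors.reverse else neighbors).filter
                (fun n => !(PySem.Set.contains visited' n))).reverse ++ rest)
            ⟨visited', index', names'⟩).1).names :=
        pvMain g direction idxp cycle _ ⟨visited', index', names'⟩
      rw [hstep, pvVisitList_append]
      have horder :
          ((if direction = "forward" then neighbors.reverse else neighbors).filter
              (fun n => !(PySem.Set.contains visited' n))).reverse =
          (if direction ≠ "forward" then neighbors.reverse else neighbors).filter
              (fun n => !(PySem.Set.contains visited' n)) := by
        by_cases hd : direction = "forward"
        · simp [hd, List.filter_reverse]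
        · simp [hd, List.filter_reverse]
      rw [horder]
      rw [pvVisitList_filter g direction idxp cycle _ visited' ⟨visited', index', names'⟩ (fun x h => h)]
      have hvisit :
          (pvVisit g direction idxp cycle current s).1 =
          (pvVisitList g direction idxp cycle
            (if direction ≠ "forward" then neighbors.reverse else neighbors)
            ⟨visited', index', names'⟩).1 := by
        conv_lhs => rw [pvVisit]
        rw [dif_neg hv]
      rw [← hvisit, ← pvVisitList_cons]
  termination_by (pvUc g s.visited, stack.length)
  decreasing_by
  · exact Prod.Lex.right _ (Nat.lt_succ_self _)
  · by_cases hk : current ∈ g.keys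
    · exact Prod.Lex.left _ _ (pvUc_add_lt g s.visited current hk (by simpa using hv))
    · rw [pvUc_add_eq g s.visited current hk]
      apply Prod.Lex.right
      rw [pvNonkey_neighbors g current hk]
      simp

-- ---- fuel adequacy for B's port ----

theorem pvFoldVisit (g : PySem.Dict String (List String)) (direction : String) (idxp cycle : Int)
    (f : Nat)
    (hIH : ∀ n s, pvUc g s.visited < f →
      pvVisitF g direction idxp cycle f n s = (pvVisit g direction idxp cycle n s).1) :
    ∀ (ns : List String) (s : PvSt), pvUc g s.visited < f →
      ns.foldl (fun t n => pvVisitF g direction idxp cycle f n t) s =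
      (pvVisitList g direction idxp cycle ns s).1 := by
  intro ns
  induction ns with
  | nil => intro s _; rw [List.foldl_nil, pvVisitList_nil]
  | cons n rest ih =>
    intro s h
    rw [List.foldl_cons, hIH n s h, pvVisitList_cons]
    apply ih
    have := pvUc_le g s.visited _ (pvVisit g direction idxp cycle n s).2
    omega

theorem pvVisitF_adeq (g : PySem.Dict String (List String)) (direction : String) (idxp cycle : Int) :
    ∀ (f : Nat) (n : String) (s : PvSt), pvUc g s.visited < f →
      pvVisitF g direction idxp cycle f n s = (pvVisit g direction idxp cycle n s).1 := by
  intro f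
  induction f with
  | zero => intro n s h; omega
  | succ f ih =>
    intro n s h
    by_cases hv : PySem.Set.contains s.visited n = true
    · rw [pvVisit_visited _ _ _ _ _ _ hv]
      show (if PySem.Set.contains s.visited n then s else _) = s
      rw [if_pos hv]
    · have hvisit :
          (pvVisit g direction idxp cycle n s).1 =
          (pvVisitList g direction idxp cycle
            (if direction ≠ "forward"
              then ((g.getD n []).filter (fun m => g.contains m)).reverse
              else (g.getD n []).filter (fun m => g.contains m))
            ⟨PySem.Set.add s.visited n,
             PySem.Int.mod ((if s.index = cycle - 1 then s.index + 1 else s.index) + idxp) cycle,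
             (if PySem.Str.startswith n "N" then
                s.names.insert n ("N" ++ PySem.Int.toStr (PySem.Int.mod ((if s.index = cycle - 1 then s.index + 1 else s.index) + idxp) cycle))
              else if PySem.Str.startswith n "C" then
                s.names.insert n ("C" ++ PySem.Int.toStr (PySem.Int.mod ((if s.index = cycle - 1 then s.index + 1 else s.index) + idxp) cycle))
              else s.names)⟩).1 := by
        conv_lhs => rw [pvVisit]
        rw [dif_neg hv]
      rw [hvisit]
      show (if PySem.Set.contains s.visited n then s else _) = _
      rw [if_neg hv]
      by_cases hk : n ∈ g.keys
      · apply pvFoldVisit g direction idxp cycle f ih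
        show pvUc g (PySem.Set.add s.visited n) < f
        have := pvUc_add_lt g s.visited n hk (by simpa using hv)
        omega
      · rw [pvNonkey_neighbors g n hk]
        by_cases hd : direction ≠ "forward" <;>
          simp only [hd, if_true, if_false, List.reverse_nil, List.foldl_nil, pvVisitList_nil, ite_self]

-- ---- fuel adequacy for A's port ----

theorem pvLoopA_adeq (g : PySem.Dict String (List String)) (direction : String) (idxp cycle : Int) :
    ∀ (f : Nat) (stack : List String) (visited : PySem.Set String) (index : Int)
      (names : PySem.Dict String String), stack.length + pvSumDeg g visited ≤ f →
      trLoopAF g direction idxp cycle f stack visited index names =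
      trLoopA g direction idxp cycle stack visited index names := by
  intro f
  induction f with
  | zero =>
    intro stack visited index names h
    match stack with
    | [] => rw [trLoopA]; rfl
    | c :: r => simp at h
  | succ f ih =>
    intro stack visited index names h
    match stack with
    | [] => rw [trLoopA]; rfl
    | current :: rest =>
      by_cases hv : PySem.Set.contains visited current = true
      · show (if PySem.Set.contains visited current then _ else _) = _
        rw [if_pos hv, trLoopA]
        rw [dif_pos hv]
        apply ih
        simp only [List.length_cons] at h
        omega
      · show (if PySem.Set.contains visited current then _ else _) = _
        rw [if_neg hv, trLoopA, dif_neg hv]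
        apply ih
        simp only [List.length_append, List.length_reverse, List.length_cons] at h ⊢
        by_cases hk : current ∈ g.keys
        · have h1 := pvSumDeg_add_le g visited current hk (by simpa using hv)
          have h2 : (((if direction = "forward"
              then ((g.getD current []).filter (fun n => g.contains n)).reverse
              else (g.getD current []).filter (fun n => g.contains n)).filter
                (fun n => !(PySem.Set.contains (PySem.Set.add visited current) n))).length)
              ≤ (g.getD current []).length := by
            by_cases hd : direction = "forward"
            · simp only [hd, if_true]
              calc _ ≤ (((g.getD current []).filter (fun n => g.contains n)).reverse).length :=
                    List.length_filter_le _ _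
                _ = (((g.getD current []).filter (fun n => g.contains n))).length := by
                    rw [List.length_reverse]
                _ ≤ _ := List.length_filter_le _ _
            · simp only [hd, if_false]
              calc _ ≤ (((g.getD current []).filter (fun n => g.contains n))).length :=
                    List.length_filter_le _ _
                _ ≤ _ := List.length_filter_le _ _
          omega
        · rw [pvSumDeg_add_eq g visited current hk, pvNonkey_neighbors g current hk]
          have : ((if direction = "forward" then ([] : List String).reverse else ([] : List String)).filter
              (fun n => !(PySem.Set.contains (PySem.Set.add visited current) n))).length = 0 := by
            by_cases hd : direction = "forward" <;> simp [hd]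
          omega

-- initial fuel bounds
theorem pvGetD_len_le (graph : List (String × List String)) (k : String) :
    ((PySem.Dict.mk graph).getD k []).length ≤ (graph.map (fun p => p.2.length)).sum := by
  rcases hg : (PySem.Dict.mk graph).get? k with _ | v
  · rw [PySem.Dict.getD_eq_get?_getD, hg]
    exact Nat.zero_le _
  · rw [PySem.Dict.getD_eq_get?_getD, hg]
    have hmem : (k, v) ∈ (PySem.Dict.mk graph).items := PySem.Dict.mem_items_of_get?_eq_some _ hg
    have hmem2 : v.length ∈ graph.map (fun p => p.2.length) :=
      List.mem_map.mpr ⟨(k, v), hmem, rfl⟩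
    exact List.single_le_sum (fun x _ => Nat.zero_le x) _ hmem2

theorem pvSumDeg_empty_le (graph : List (String × List String)) :
    pvSumDeg (PySem.Dict.mk graph) PySem.Set.empty ≤
      graph.length * (graph.map (fun p => p.2.length)).sum := by
  unfold pvSumDeg
  have hb : ∀ x ∈ ((PySem.Dict.mk graph).keys.filter
      (fun k => !(PySem.Set.contains PySem.Set.empty k))).map
      (fun k => ((PySem.Dict.mk graph).getD k []).length),
      x ≤ (graph.map (fun p => p.2.length)).sum := by
    intro x hx
    rcases List.mem_map.mp hx with ⟨k, _, rfl⟩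
    exact pvGetD_len_le graph k
  calc _ ≤ _ := List.sum_le_card_nsmul _ _ hb
    _ ≤ graph.length * (graph.map (fun p => p.2.length)).sum := by
        rw [smul_eq_mul, List.length_map]
        apply Nat.mul_le_mul_right
        calc _ ≤ (PySem.Dict.mk graph).keys.length := List.length_filter_le _ _
          _ = graph.length := by simp [PySem.Dict.keys]

theorem pvUc_empty_le (graph : List (String × List String)) :
    pvUc (PySem.Dict.mk graph) PySem.Set.empty ≤ graph.length := by
  unfold pvUc
  calc _ ≤ (PySem.Dict.mk graph).keys.length := List.length_filter_le _ _
    _ = graph.length := by simp [PySem.Dict.keys]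

-- ===== VERDICT (by name: the statement is the Claim_ definition above) =====
theorem traverse_cycle_py_spec : Claim_equal_traverse_cycle_py := by
  intro graph start_node direction start_index idx cycle _ _
  unfold Spec_traverse_cycle_py traverse_cycle_py traverse_cycle_py_alt
  rw [pvLoopA_adeq (PySem.Dict.mk graph) direction idx cycle _ [start_node] PySem.Set.empty
    start_index PySem.Dict.empty
    (by have := pvSumDeg_empty_le graph; simp only [List.length_cons, List.length_nil]; omega)]
  rw [pvVisitF_adeq (PySem.Dict.mk graph) direction idx cycle (graph.length + 1) start_node
    ⟨PySem.Set.empty, start_index, PySem.Dict.empty⟩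
    (by
      show pvUc (PySem.Dict.mk graph) PySem.Set.empty < graph.length + 1
      have := pvUc_empty_le graph; omega)]
  have h := pvMain (PySem.Dict.mk graph) direction idx cycle [start_node]
    ⟨PySem.Set.empty, start_index, PySem.Dict.empty⟩
  rw [h]
  congr 1
  rw [pvVisitList_cons, pvVisitList_nil]
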